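-- pv_equiv track=rewrite | github.com/ericmerle3789/Collatz-Junction-Theorem | research_log/R180_aperiodicity.py | check_periodicity_from_positions
-- ===== SOURCE A (Python) =====
-- def check_periodicity_from_positions(positions, S):
--     """
--     Check periodicity directly from positions.
--     A vector with period p means: position d is a 1-position iff d mod p is in
--     the set of 1-positions in the first period.
--     """
--     pos_set = set(positions)
--
--     for p in range(1, S):
--         if S % p != 0:
--             continue
--         # Check: the pattern in [0, p) repeats
--         pattern = set(d % p for d in positions)
--         # Reconstruct full position set from pattern
--         reconstructed = set()
--         for base in pattern:
--             for k in range(S // p):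
--                 reconstructed.add(base + k * p)
--         if reconstructed == pos_set:
--             return True, p
--
--     return False, S
-- ===== SOURCE B (Python) =====
-- def check_periodicity_from_positions(positions, S):
--     # Divisor-period check done directly on the positions: a divisor p < S of S
--     # tiles iff the position set is closed under shifting by +/- p inside [0, S).
--     if S < 1 or any(d < 0 or d >= S for d in positions):
--         return (False, S)
--     ps = set(positions)
--     for p in range(1, S):
--         if S % p == 0 \
--            and all(d + p in ps or d + p >= S for d in positions) \
--            and all(d - p in ps or d < p for d in positions):
--             return (True, p)
--     return (False, S)
-- ===== Notes on version B (the rewrite author's own statement) =====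
-- stated objective: faster
-- what changed: Instead of rebuilding and comparing a reconstructed position set for each divisor p, B validates positions once and then tests each divisor p by checking that the position set is closed under shifting by +/- p inside [0,S), which touches only the n positions per divisor instead of all S reconstructed slots.
import Mathlib
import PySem

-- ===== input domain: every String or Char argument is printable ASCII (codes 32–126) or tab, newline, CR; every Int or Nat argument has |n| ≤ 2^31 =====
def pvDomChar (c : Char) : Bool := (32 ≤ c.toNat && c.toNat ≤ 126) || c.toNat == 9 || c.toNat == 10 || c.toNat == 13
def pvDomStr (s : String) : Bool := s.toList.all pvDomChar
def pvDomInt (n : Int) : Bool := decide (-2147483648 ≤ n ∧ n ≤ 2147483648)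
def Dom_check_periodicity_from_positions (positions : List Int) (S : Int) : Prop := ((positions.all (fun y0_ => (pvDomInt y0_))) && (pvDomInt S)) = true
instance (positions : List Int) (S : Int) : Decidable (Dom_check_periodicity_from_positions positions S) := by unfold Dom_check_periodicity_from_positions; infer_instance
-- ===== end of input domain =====

-- B replaces A's per-divisor set reconstruction by a per-divisor shift-closure test on the
-- positions themselves (after validating 0 <= d < S once), touching only the positions.

-- ===== PORT A =====
-- the 'for p in range(1, S)' loop of A, with early return
def pvALoop (positions : List Int) (pos_set : PySem.Set Int) (S : Int) :
    List Int → Bool × Int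
  | [] => (false, S)
  | p :: ps =>
    if PySem.Int.mod S p ≠ 0 then pvALoop positions pos_set S ps
    else
      let pattern : PySem.Set Int := PySem.Set.ofList (positions.map (fun d => PySem.Int.mod d p))
      let reconstructed : PySem.Set Int :=
        pattern.foldl (fun r base =>
          (PySem.List.pyRange 0 (PySem.Int.floordiv S p) 1).foldl
            (fun r k => PySem.Set.add r (base + k * p)) r) PySem.Set.empty
      if PySem.Set.equal reconstructed pos_set then (true, p) else pvALoop positions pos_set S ps

def check_periodicity_from_positions (positions : List Int) (S : Int) : Bool × Int :=
  pvALoop positions (PySem.Set.ofList positions) S (PySem.List.pyRange 1 S 1)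

-- ===== PORT B =====
-- the 'for p in range(1, S)' loop of B, with early return
def pvBLoop (positions : List Int) (ps : PySem.Set Int) (S : Int) :
    List Int → Bool × Int
  | [] => (false, S)
  | p :: rest =>
    if (PySem.Int.mod S p == 0
        && positions.all (fun d => PySem.Set.contains ps (d + p) || decide (S ≤ d + p))
        && positions.all (fun d => PySem.Set.contains ps (d - p) || decide (d < p)))
    then (true, p)
    else pvBLoop positions ps S rest

def check_periodicity_from_positions_alt (positions : List Int) (S : Int) : Bool × Int :=
  if (decide (S < 1) || positions.any (fun d => decide (d < 0) || decide (S ≤ d))) then (false, S)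
  else pvBLoop positions (PySem.Set.ofList positions) S (PySem.List.pyRange 1 S 1)

-- ===== PRECONDITION & SPEC =====
def Spec_check_periodicity_from_positions (positions : List Int) (S : Int) (out : Bool × Int) : Prop := out = check_periodicity_from_positions_alt positions S
instance (positions : List Int) (S : Int) (out : Bool × Int) : Decidable (Spec_check_periodicity_from_positions positions S out) := by unfold Spec_check_periodicity_from_positions; infer_instance

-- ===== CLAIM (what is proved, stated in full; the proofs are below) =====
def Claim_equal_check_periodicity_from_positions : Prop := ∀ (positions : List Int) (S : Int), Dom_check_periodicity_from_positions positions S → Spec_check_periodicity_from_positions positions S (check_periodicity_from_positions positions S)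

-- ===== LEMMAS AND PROOFS =====

-- membership in A's doubly-folded 'reconstructed' set
theorem pv_mem_fold2 (L R : List Int) (p y : Int) (init : PySem.Set Int) :
    (y ∈ L.foldl (fun r base =>
        R.foldl (fun r k => PySem.Set.add r (base + k * p)) r) init) ↔
      y ∈ init ∨ ∃ b ∈ L, ∃ k ∈ R, y = b + k * p := by
  induction L generalizing init with
  | nil => simp
  | cons b L ih =>
    rw [List.foldl_cons, ih, PySem.Set.mem_foldl_add]
    constructor
    · rintro ((h | ⟨k, hk, rfl⟩) | ⟨b', hb', k, hk, rfl⟩)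
      · exact Or.inl h
      · exact Or.inr ⟨b, List.mem_cons_self, k, hk, rfl⟩
      · exact Or.inr ⟨b', List.mem_cons_of_mem b hb', k, hk, rfl⟩
    · rintro (h | ⟨b', hb', k, hk, rfl⟩)
      · exact Or.inl (Or.inl h)
      · rcases List.mem_cons.mp hb' with rfl | hb'
        · exact Or.inl (Or.inr ⟨k, hk, rfl⟩)
        · exact Or.inr ⟨b', hb', k, hk, rfl⟩

-- S = (S // p) * p when p divides S
theorem pv_div_mul (S p : Int) (hm : PySem.Int.mod S p = 0) :
    PySem.Int.floordiv S p * p = S := by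
  have := PySem.Int.floordiv_mul_add_mod S p
  omega

-- every element of 'reconstructed' lies in [0, S)
theorem pv_recon_bound (S p d k : Int) (hp : 0 < p) (hm : PySem.Int.mod S p = 0)
    (hk0 : 0 ≤ k) (hk1 : k < PySem.Int.floordiv S p) :
    0 ≤ PySem.Int.mod d p + k * p ∧ PySem.Int.mod d p + k * p < S := by
  have h0 := PySem.Int.mod_nonneg d hp
  have h1 := PySem.Int.mod_lt d hp
  have hkp : 0 ≤ k * p := mul_nonneg hk0 (le_of_lt hp)
  have hS := pv_div_mul S p hm
  have : (k + 1) * p ≤ PySem.Int.floordiv S p * p :=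
    mul_le_mul_of_nonneg_right (by omega) (le_of_lt hp)
  constructor
  · omega
  · nlinarith

-- closure upward: adding p while staying below S
theorem pv_up (positions : List Int) (S p : Int) (hp : 0 < p)
    (h1 : ∀ d ∈ positions, d + p ∈ positions ∨ S ≤ d + p) :
    ∀ (n : Nat), ∀ d ∈ positions, d + (n : Int) * p < S → d + (n : Int) * p ∈ positions := by
  intro n
  induction n with
  | zero => intro d hd _; simpa using hd
  | succ n ih =>
    intro d hd hlt
    push_cast at hlt ⊢
    have hexp : ((n : Int) + 1) * p = (n : Int) * p + p := by ring
    rw [hexp] at hlt ⊢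
    have hmem := ih d hd (by linarith)
    rcases h1 _ hmem with h | h
    · have e : d + ((n : Int) * p + p) = (d + (n : Int) * p) + p := by ring
      rw [e]; exact h
    · linarith

-- closure downward: subtracting p while staying at or above 0
theorem pv_down (positions : List Int) (S p : Int) (hp : 0 < p)
    (h2 : ∀ d ∈ positions, d - p ∈ positions ∨ d < p) :
    ∀ (n : Nat), ∀ d ∈ positions, 0 ≤ d - (n : Int) * p → d - (n : Int) * p ∈ positions := by
  intro n
  induction n with
  | zero => intro d hd _; simpa using hd
  | succ n ih =>
    intro d hd hge
    push_cast at hge ⊢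
    have hexp : ((n : Int) + 1) * p = (n : Int) * p + p := by ring
    rw [hexp] at hge ⊢
    have hmem := ih d hd (by linarith)
    rcases h2 _ hmem with h | h
    · have e : d - ((n : Int) * p + p) = (d - (n : Int) * p) - p := by ring
      rw [e]; exact h
    · linarith

-- the per-divisor equivalence: A's set equality = B's two shift-closure checks
theorem pv_equal_iff (positions : List Int) (S p : Int) (hp : 0 < p)
    (hm : PySem.Int.mod S p = 0)
    (hin : ∀ d ∈ positions, 0 ≤ d ∧ d < S) :
    PySem.Set.equal
      ((PySem.Set.ofList (positions.map (fun d => PySem.Int.mod d p))).foldl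
        (fun r base =>
          (PySem.List.pyRange 0 (PySem.Int.floordiv S p) 1).foldl
            (fun r k => PySem.Set.add r (base + k * p)) r) PySem.Set.empty)
      (PySem.Set.ofList positions) =
    ((∀ d ∈ positions, d + p ∈ positions ∨ S ≤ d + p : Bool)
      && (∀ d ∈ positions, d - p ∈ positions ∨ d < p : Bool)) := by
  have hS := pv_div_mul S p hm
  have hrec : ∀ y, (y ∈ (PySem.Set.ofList (positions.map (fun d => PySem.Int.mod d p))).foldl
        (fun r base =>
          (PySem.List.pyRange 0 (PySem.Int.floordiv S p) 1).foldl
            (fun r k => PySem.Set.add r (base + k * p)) r) PySem.Set.empty) ↔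
      ∃ d ∈ positions, ∃ k : Int, (0 ≤ k ∧ k < PySem.Int.floordiv S p) ∧
        y = PySem.Int.mod d p + k * p := by
    intro y
    rw [pv_mem_fold2]
    simp only [PySem.Set.mem_ofList, List.mem_map, PySem.List.mem_pyRange_one]
    constructor
    · rintro (h | ⟨b, ⟨d, hd, rfl⟩, k, hk, rfl⟩)
      · simp [PySem.Set.empty] at h
      · exact ⟨d, hd, k, hk, rfl⟩
    · rintro ⟨d, hd, k, hk, rfl⟩
      exact Or.inr ⟨_, ⟨d, hd, rfl⟩, k, hk, rfl⟩
  rw [Bool.eq_iff_iff]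
  simp only [Bool.and_eq_true, decide_eq_true_eq, PySem.Set.equal_iff, hrec,
    PySem.Set.mem_ofList]
  constructor
  · -- set equality → closure conditions
    intro heq
    constructor
    · intro d hd
      by_cases hlt : d + p < S
      · left
        have hd0 := (hin d hd).1
        have hdp := PySem.Int.floordiv_mul_add_mod d p
        have hmlt := PySem.Int.mod_lt d hp
        have hmge := PySem.Int.mod_nonneg d hp
        have hq0 : 0 ≤ PySem.Int.floordiv d p := by
          rw [PySem.Int.le_floordiv_iff_mul_le hp]; simpa using hd0
        have hmul : (PySem.Int.floordiv d p + 1) * p < PySem.Int.floordiv S p * p := by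
          have e : (PySem.Int.floordiv d p + 1) * p = PySem.Int.floordiv d p * p + p := by ring
          linarith
        have hqlt : PySem.Int.floordiv d p + 1 < PySem.Int.floordiv S p :=
          lt_of_mul_lt_mul_right hmul (le_of_lt hp)
        exact (heq (d + p)).mp ⟨d, hd, PySem.Int.floordiv d p + 1,
          ⟨by omega, hqlt⟩, by
            have e : (PySem.Int.floordiv d p + 1) * p = PySem.Int.floordiv d p * p + p := by ring
            linarith⟩
      · right; omega
    · intro d hd
      by_cases hge : p ≤ d
      · left
        have hdS := (hin d hd).2
        have hdp := PySem.Int.floordiv_mul_add_mod d p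
        have hmlt := PySem.Int.mod_lt d hp
        have hmge := PySem.Int.mod_nonneg d hp
        have hq1 : 1 ≤ PySem.Int.floordiv d p := by
          rw [PySem.Int.le_floordiv_iff_mul_le hp]; simpa using hge
        have hmul : PySem.Int.floordiv d p * p < PySem.Int.floordiv S p * p := by linarith
        have hqlt : PySem.Int.floordiv d p < PySem.Int.floordiv S p :=
          lt_of_mul_lt_mul_right hmul (le_of_lt hp)
        exact (heq (d - p)).mp ⟨d, hd, PySem.Int.floordiv d p - 1,
          ⟨by omega, by omega⟩, by
            have e : (PySem.Int.floordiv d p - 1) * p = PySem.Int.floordiv d p * p - p := by ring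
            linarith⟩
      · right; omega
  · -- closure conditions → set equality
    rintro ⟨h1, h2⟩ x
    constructor
    · rintro ⟨d, hd, k, ⟨hk0, hk1⟩, rfl⟩
      have hd0 := (hin d hd).1
      have hdS := (hin d hd).2
      have hdp := PySem.Int.floordiv_mul_add_mod d p
      have hmlt := PySem.Int.mod_lt d hp
      have hmge := PySem.Int.mod_nonneg d hp
      set q := PySem.Int.floordiv d p with hq
      have hq0 : 0 ≤ q := by
        rw [hq, PySem.Int.le_floordiv_iff_mul_le hp]; simpa using hd0
      by_cases hkq : q ≤ k
      · have hx : PySem.Int.mod d p + k * p = d + ((k - q).toNat : Int) * p := by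
          rw [Int.toNat_of_nonneg (by omega)]; linear_combination hdp
        rw [hx]
        apply pv_up positions S p hp h1 _ d hd
        rw [← hx]
        have hle : (k + 1) * p ≤ PySem.Int.floordiv S p * p :=
          mul_le_mul_of_nonneg_right (by omega) (le_of_lt hp)
        have e : (k + 1) * p = k * p + p := by ring
        linarith
      · have hx : PySem.Int.mod d p + k * p = d - ((q - k).toNat : Int) * p := by
          rw [Int.toNat_of_nonneg (by omega)]; linear_combination hdp
        rw [hx]
        apply pv_down positions S p hp h2 _ d hd
        rw [← hx]
        have hkp : 0 ≤ k * p := mul_nonneg hk0 (le_of_lt hp)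
        omega
    · intro hx
      have hx0 := (hin x hx).1
      have hxS := (hin x hx).2
      have hdp := PySem.Int.floordiv_mul_add_mod x p
      have hmge := PySem.Int.mod_nonneg x hp
      refine ⟨x, hx, PySem.Int.floordiv x p, ⟨?_, ?_⟩, by linarith⟩
      · rw [PySem.Int.le_floordiv_iff_mul_le hp]; simpa using hx0
      · have hmul : PySem.Int.floordiv x p * p < PySem.Int.floordiv S p * p := by linarith
        exact lt_of_mul_lt_mul_right hmul (le_of_lt hp)

-- if some position is out of [0, S), A's loop never finds a matching p
theorem pv_aloop_bad (positions : List Int) (S d0 : Int)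
    (hd0 : d0 ∈ positions) (hbad : d0 < 0 ∨ S ≤ d0) :
    ∀ l : List Int, (∀ p ∈ l, 0 < p) →
      pvALoop positions (PySem.Set.ofList positions) S l = (false, S) := by
  intro l
  induction l with
  | nil => intro _; rfl
  | cons p ps ih =>
    intro h
    have hp : 0 < p := h p (by simp)
    have hrest : ∀ q ∈ ps, 0 < q := fun q hq => h q (by simp [hq])
    by_cases hm : PySem.Int.mod S p = 0
    · have hne : PySem.Set.equal
          ((PySem.Set.ofList (positions.map (fun d => PySem.Int.mod d p))).foldl
            (fun r base =>
              (PySem.List.pyRange 0 (PySem.Int.floordiv S p) 1).foldl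
                (fun r k => PySem.Set.add r (base + k * p)) r) PySem.Set.empty)
          (PySem.Set.ofList positions) = false := by
        rw [Bool.eq_false_iff]
        intro heq
        rw [PySem.Set.equal_iff] at heq
        have := (heq d0).mpr (by rw [PySem.Set.mem_ofList]; exact hd0)
        rw [pv_mem_fold2] at this
        rcases this with h' | ⟨b, hb, k, hk, rfl⟩
        · simp [PySem.Set.empty] at h'
        · rw [PySem.Set.mem_ofList, List.mem_map] at hb
          rcases hb with ⟨d, _, rfl⟩
          rw [PySem.List.mem_pyRange_one] at hk
          have := pv_recon_bound S p d k hp hm hk.1 hk.2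
          omega
      simp only [pvALoop, hm]
      rw [if_neg (by omega)]
      simp only [hne, if_neg (Bool.false_ne_true)]
      exact ih hrest
    · simp only [pvALoop, if_pos hm]
      exact ih hrest

-- when every position lies in [0, S), the two loops agree step by step
theorem pv_loops_eq (positions : List Int) (S : Int)
    (hin : ∀ d ∈ positions, 0 ≤ d ∧ d < S) :
    ∀ l : List Int, (∀ p ∈ l, 0 < p) →
      pvALoop positions (PySem.Set.ofList positions) S l =
        pvBLoop positions (PySem.Set.ofList positions) S l := by
  intro l
  induction l with
  | nil => intro _; rfl
  | cons p ps ih =>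
    intro h
    have hp : 0 < p := h p (by simp)
    have hrest : ∀ q ∈ ps, 0 < q := fun q hq => h q (by simp [hq])
    by_cases hm : PySem.Int.mod S p = 0
    · have hkey := pv_equal_iff positions S p hp hm hin
      have hm' : (PySem.Int.mod S p == 0) = true := by simpa using hm
      have hc1 : (positions.all fun d => PySem.Set.contains (PySem.Set.ofList positions) (d + p) || decide (S ≤ d + p)) =
          decide (∀ d ∈ positions, d + p ∈ positions ∨ S ≤ d + p) := by
        rw [Bool.eq_iff_iff]
        simp [List.all_eq_true, PySem.Set.mem_ofList]
      have hc2 : (positions.all fun d => PySem.Set.contains (PySem.Set.ofList positions) (d - p) || decide (d < p)) =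
          decide (∀ d ∈ positions, d - p ∈ positions ∨ d < p) := by
        rw [Bool.eq_iff_iff]
        simp [List.all_eq_true, PySem.Set.mem_ofList]
      simp only [pvALoop, pvBLoop, if_neg (by omega : ¬ PySem.Int.mod S p ≠ 0)]
      rw [hkey, hm', hc1, hc2, Bool.true_and]
      by_cases hb : (decide (∀ d ∈ positions, d + p ∈ positions ∨ S ≤ d + p) &&
          decide (∀ d ∈ positions, d - p ∈ positions ∨ d < p)) = true
      · rw [if_pos hb, if_pos hb]
      · rw [if_neg hb, if_neg hb]
        exact ih hrest
    · have hm' : (PySem.Int.mod S p == 0) = false := by simpa using hm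
      simp only [pvALoop, pvBLoop, if_pos hm, hm', Bool.false_and, Bool.false_eq_true,
        if_false]
      exact ih hrest

-- ===== VERDICT (by name: the statement is the Claim_ definition above) =====
theorem check_periodicity_from_positions_spec : Claim_equal_check_periodicity_from_positions := by
  intro positions S _
  unfold Spec_check_periodicity_from_positions
  unfold check_periodicity_from_positions check_periodicity_from_positions_alt
  by_cases hS : S < 1
  · rw [if_pos (by simp [hS]), PySem.List.pyRange_one_eq_nil (by omega)]
    rfl
  · by_cases hbad : ∃ d ∈ positions, d < 0 ∨ S ≤ d
    · rcases hbad with ⟨d0, hd0, hb⟩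
      have hg : (decide (S < 1) || positions.any fun d => decide (d < 0) || decide (S ≤ d)) = true := by
        simp only [Bool.or_eq_true, List.any_eq_true, decide_eq_true_eq]
        exact Or.inr ⟨d0, hd0, hb⟩
      rw [if_pos hg]
      exact pv_aloop_bad positions S d0 hd0 hb _
        (fun p hp => by have := (PySem.List.mem_pyRange_one.mp hp).1; omega)
    · push_neg at hbad
      have hg : ¬ ((decide (S < 1) || positions.any fun d => decide (d < 0) || decide (S ≤ d)) = true) := by
        simp only [Bool.or_eq_true, List.any_eq_true, decide_eq_true_eq]
        push_neg
        exact ⟨by omega, fun d hd => by have := hbad d hd; omega⟩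
      rw [if_neg hg]
      exact pv_loops_eq positions S (fun d hd => by have := hbad d hd; omega) _
        (fun p hp => by have := (PySem.List.mem_pyRange_one.mp hp).1; omega)
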